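-- pv_equiv track=rewrite | github.com/SiddhantaGupta/advent-of-code | 2023/day14/main.py | getLastEmptyIndex
-- ===== SOURCE A (Python) =====
-- def getLastEmptyIndex(r, j):
--     idx = j
--     if j == len(r) - 1:
--         return idx
--
--     for i in range(j+1, len(r)):
--         if r[i] in "#O":
--             break
--         if r[i] == ".":
--             idx = i
--
--     return idx
-- ===== SOURCE B (Python) =====
-- def getLastEmptyIndex(r, j):
--     # Two-phase: find the end of the open run after j, then scan back for the last '.'.
--     k = j + 1
--     while k < len(r) and r[k] not in "#O":
--         k += 1
--     for i in range(k - 1, j, -1):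
--         if r[i] == ".":
--             return i
--     return j
-- ===== Notes on version B (the rewrite author's own statement) =====
-- stated objective: alternative
-- what changed: Replaced A's single forward scan that carries a last-dot accumulator and a redundant j==len-1 guard with a two-phase decomposition: first advance to the end of the open run after j, then scan that window backward and return on the first '.'.
import Mathlib
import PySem

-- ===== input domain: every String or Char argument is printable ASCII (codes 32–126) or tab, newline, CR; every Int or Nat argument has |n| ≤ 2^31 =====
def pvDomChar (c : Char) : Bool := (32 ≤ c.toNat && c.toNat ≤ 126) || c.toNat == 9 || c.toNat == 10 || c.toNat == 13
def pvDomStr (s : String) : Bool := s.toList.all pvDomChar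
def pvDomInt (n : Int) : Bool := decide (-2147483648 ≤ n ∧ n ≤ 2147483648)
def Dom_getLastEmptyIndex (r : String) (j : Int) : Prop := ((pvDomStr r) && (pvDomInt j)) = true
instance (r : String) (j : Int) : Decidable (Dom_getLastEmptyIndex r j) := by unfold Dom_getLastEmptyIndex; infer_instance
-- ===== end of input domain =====

-- B replaces A's single forward scan-with-accumulator by a two-phase decomposition
-- (find the end of the open run, then scan backward for the last '.'); alternative, not faster.

-- ===== PORT A =====
-- A's for-loop over range(j+1, len(r)) with `break` and accumulator idx, as recursion
-- over the index list; pyGet? none = Python IndexError (outside Pre_), port stops there.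
def pvLoopA (cs : List Char) : List Int → Int → Int
  | [], idx => idx
  | i :: rest, idx =>
    match PySem.List.pyGet? cs i with
    | some c =>
      if c = '#' ∨ c = 'O' then idx
      else if c = '.' then pvLoopA cs rest i
      else pvLoopA cs rest idx
    | none => idx

def getLastEmptyIndex (r : String) (j : Int) : Int :=
  let cs := r.toList
  if j = (cs.length : Int) - 1 then j
  else pvLoopA cs (PySem.List.pyRange (j + 1) cs.length 1) j

-- ===== PORT B =====
-- the while loop: advance k while in range and r[k] is not a blocker (none = IndexError, outside Pre_)
def pvFindBlocker (cs : List Char) (k : Int) : Int :=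
  if h : k < (cs.length : Int) then
    match PySem.List.pyGet? cs k with
    | some c => if c = '#' ∨ c = 'O' then k else pvFindBlocker cs (k + 1)
    | none => k
  else k
termination_by ((cs.length : Int) - k).toNat
decreasing_by omega

-- the backward for-loop with early return, over its index list; default d = j
def pvBackScan (cs : List Char) : List Int → Int → Int
  | [], d => d
  | i :: rest, d =>
    match PySem.List.pyGet? cs i with
    | some c => if c = '.' then i else pvBackScan cs rest d
    | none => i

def getLastEmptyIndex_alt (r : String) (j : Int) : Int :=
  let cs := r.toList
  let k := pvFindBlocker cs (j + 1)
  pvBackScan cs (PySem.List.pyRange (k - 1) j (-1)) j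

-- ===== PRECONDITION & SPEC =====
-- Pre_ excludes exactly the inputs where A raises IndexError (first access r[j+1] with j+1 < -len(r)); B raises there too.
def Pre_getLastEmptyIndex (r : String) (j : Int) : Prop := -(r.toList.length : Int) ≤ j + 1
instance (r : String) (j : Int) : Decidable (Pre_getLastEmptyIndex r j) := by unfold Pre_getLastEmptyIndex; infer_instance
def pvWitness_getLastEmptyIndex : String × Int := ("O..#.", 0)

def Spec_getLastEmptyIndex (r : String) (j : Int) (out : Int) : Prop := out = getLastEmptyIndex_alt r j
instance (r : String) (j : Int) (out : Int) : Decidable (Spec_getLastEmptyIndex r j out) := by unfold Spec_getLastEmptyIndex; infer_instance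

-- ===== CLAIM (what is proved, stated in full; the proofs are below) =====
def Claim_equal_getLastEmptyIndex : Prop := ∀ (r : String) (j : Int), Dom_getLastEmptyIndex r j → Pre_getLastEmptyIndex r j → Spec_getLastEmptyIndex r j (getLastEmptyIndex r j)

-- ===== LEMMAS AND PROOFS =====

lemma pvFindBlocker_ge_aux (cs : List Char) (n : Nat) :
    ∀ k : Int, (cs.length : Int) - k ≤ n → k ≤ pvFindBlocker cs k := by
  induction n with
  | zero =>
      intro k hk
      rw [pvFindBlocker, dif_neg (by omega : ¬ k < (cs.length : Int))]
  | succ m ih =>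
      intro k hk
      by_cases h : k < (cs.length : Int)
      · rcases hc : PySem.List.pyGet? cs k with _ | c
        · rw [pvFindBlocker]; simp [dif_pos h, hc]
        · by_cases hb : c = '#' ∨ c = 'O'
          · rw [pvFindBlocker]; simp [dif_pos h, hc, hb]
          · rw [pvFindBlocker]; simp only [dif_pos h, hc]
            rw [if_neg hb]
            have := ih (k + 1) (by omega); omega
      · rw [pvFindBlocker, dif_neg h]

lemma pvFindBlocker_ge (cs : List Char) (k : Int) : k ≤ pvFindBlocker cs k :=
  pvFindBlocker_ge_aux cs ((cs.length : Int) - k).toNat k (by omega)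

lemma pvBackScan_append_single (cs : List Char) (xs : List Int) (s d : Int) (c : Char)
    (h : PySem.List.pyGet? cs s = some c) :
    pvBackScan cs (xs ++ [s]) d = pvBackScan cs xs (if c = '.' then s else d) := by
  induction xs with
  | nil => simp [pvBackScan, h]
  | cons i rest ih =>
      simp only [List.cons_append, pvBackScan]
      rcases hi : PySem.List.pyGet? cs i with _ | c'
      · rfl
      · by_cases hd : c' = '.' <;> simp [hd, ih]

lemma pyRange_neg_split (s t : Int) (h : s < t) :
    PySem.List.pyRange (t - 1) (s - 1) (-1) = PySem.List.pyRange (t - 1) s (-1) ++ [s] := by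
  have h1 : PySem.List.pyRange (t - 1) (s - 1) (-1) = (PySem.List.pyRange s t 1).reverse := by
    rw [PySem.List.pyRange_neg_one_eq_reverse]; norm_num
  have h2 : PySem.List.pyRange (t - 1) s (-1) = (PySem.List.pyRange (s + 1) t 1).reverse := by
    rw [PySem.List.pyRange_neg_one_eq_reverse]; norm_num
  rw [h1, h2, PySem.List.pyRange_one_cons h]
  simp

lemma pvMain (cs : List Char) (n : Nat) (s d : Int)
    (hn : (cs.length : Int) - s ≤ n) (hs : -(cs.length : Int) ≤ s) :
    pvLoopA cs (PySem.List.pyRange s cs.length 1) d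
      = pvBackScan cs (PySem.List.pyRange (pvFindBlocker cs s - 1) (s - 1) (-1)) d := by
  induction n generalizing s d with
  | zero =>
      have hge : (cs.length : Int) ≤ s := by omega
      rw [PySem.List.pyRange_one_eq_nil hge, pvFindBlocker, dif_neg (not_lt.mpr hge)]
      rw [PySem.List.pyRange_neg_one_eq_nil (by omega)]
      rfl
  | succ m ih =>
      by_cases hlt : s < (cs.length : Int)
      · obtain ⟨c, hc⟩ : ∃ c, PySem.List.pyGet? cs s = some c := by
          rcases h : PySem.List.pyGet? cs s with _ | c
          · rw [PySem.List.pyGet?_eq_none_iff] at h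
            exact absurd ⟨hs, hlt⟩ h
          · exact ⟨c, rfl⟩
        rw [PySem.List.pyRange_one_cons hlt]
        by_cases hb : c = '#' ∨ c = 'O'
        · have hk : pvFindBlocker cs s = s := by rw [pvFindBlocker]; simp [hlt, hc, hb]
          rw [hk, PySem.List.pyRange_neg_one_eq_nil (by omega)]
          simp [pvLoopA, hc, hb, pvBackScan]
        · have hk : pvFindBlocker cs s = pvFindBlocker cs (s + 1) := by
            rw [pvFindBlocker]; simp [hlt, hc, hb]
          have hge : s + 1 ≤ pvFindBlocker cs (s + 1) := pvFindBlocker_ge cs (s + 1)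
          have hsplit : PySem.List.pyRange (pvFindBlocker cs (s + 1) - 1) (s - 1) (-1)
              = PySem.List.pyRange (pvFindBlocker cs (s + 1) - 1) s (-1) ++ [s] :=
            pyRange_neg_split s (pvFindBlocker cs (s + 1)) (by omega)
          have hs1 : PySem.List.pyRange (pvFindBlocker cs (s + 1) - 1) ((s + 1) - 1) (-1)
              = PySem.List.pyRange (pvFindBlocker cs (s + 1) - 1) s (-1) := by norm_num
          by_cases hdot : c = '.'
          · have := ih (s + 1) s (by omega) (by omega)
            rw [hs1] at this
            simp only [pvLoopA, hc]
            rw [if_neg hb, if_pos hdot, hk, hsplit,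
              pvBackScan_append_single cs _ s d c hc, if_pos hdot, this]
          · have := ih (s + 1) d (by omega) (by omega)
            rw [hs1] at this
            simp only [pvLoopA, hc]
            rw [if_neg hb, if_neg hdot, hk, hsplit,
              pvBackScan_append_single cs _ s d c hc, if_neg hdot, this]
      · have hge : (cs.length : Int) ≤ s := by omega
        rw [PySem.List.pyRange_one_eq_nil hge, pvFindBlocker, dif_neg hlt]
        rw [PySem.List.pyRange_neg_one_eq_nil (by omega)]
        rfl

-- ===== VERDICT (by name: the statement is the Claim_ definition above) =====
theorem getLastEmptyIndex_spec : Claim_equal_getLastEmptyIndex := by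
  intro r j _ hpre
  unfold Spec_getLastEmptyIndex getLastEmptyIndex getLastEmptyIndex_alt
  unfold Pre_getLastEmptyIndex at hpre
  set cs := r.toList with hcs
  by_cases hj : j = (cs.length : Int) - 1
  · have hk : pvFindBlocker cs (j + 1) = j + 1 := by
      rw [pvFindBlocker, dif_neg (by omega : ¬ (j + 1 < (cs.length : Int)))]
    simp only [if_pos hj, hk]
    rw [PySem.List.pyRange_neg_one_eq_nil (by omega)]
    rfl
  · simp only [if_neg hj]
    have := pvMain cs ((cs.length : Int) - (j + 1)).toNat (j + 1) j (by omega) (by omega)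
    rw [this]
    norm_num
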